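-- pv_equiv track=rewrite | github.com/Varsha-28/VARSHA_BRICK_AND_BALL_ | varsha_ball_brick_zoho.py | baseChecker
-- ===== SOURCE A (Python) =====
-- def baseChecker(l,bp,base,base_len):
--     base=[bp]
--     for i in range(base_len-1):
--         if i%2==0:
--             base.append(base[-1]+1)
--         else:
--             base.insert(0,base[0]-1)
--     return base
-- ===== SOURCE B (Python) =====
-- def baseChecker(l, bp, base, base_len):
--     n = base_len - 1
--     if n < 0:
--         n = 0
--     lo = bp - n // 2
--     hi = bp + (n + 1) // 2
--     return list(range(lo, hi + 1))
-- ===== Notes on version B (the rewrite author's own statement) =====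
-- stated objective: faster
-- what changed: Replaced the alternating append/insert-at-front loop (each front insert shifts the whole list) by a closed-form computation of the two endpoints from parity counts and a single range() construction.
import Mathlib
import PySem

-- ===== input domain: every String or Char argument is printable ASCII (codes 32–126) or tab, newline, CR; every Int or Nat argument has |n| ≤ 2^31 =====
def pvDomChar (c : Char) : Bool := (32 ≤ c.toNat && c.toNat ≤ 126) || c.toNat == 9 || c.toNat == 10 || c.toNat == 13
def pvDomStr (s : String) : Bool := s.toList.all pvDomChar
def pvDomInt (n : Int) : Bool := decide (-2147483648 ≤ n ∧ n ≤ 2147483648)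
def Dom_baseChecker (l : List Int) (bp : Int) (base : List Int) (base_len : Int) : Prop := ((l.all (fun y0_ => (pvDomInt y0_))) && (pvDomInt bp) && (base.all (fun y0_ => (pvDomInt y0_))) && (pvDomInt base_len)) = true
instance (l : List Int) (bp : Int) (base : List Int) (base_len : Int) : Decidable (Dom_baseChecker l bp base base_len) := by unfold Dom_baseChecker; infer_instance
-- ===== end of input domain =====

-- B replaces A's alternating append / insert-at-front loop (quadratic from the front inserts)
-- by a closed-form computation of the two endpoints and one range construction (linear).

-- ===== PORT A =====
-- the accumulator always starts as [bp] and only grows, so it is never empty and the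
-- b[-1] / b[0] lookups (pyGetD with default 0) are always in range (the default is never used)
def baseChecker (l : List Int) (bp : Int) (base : List Int) (base_len : Int) : List Int :=
  (PySem.List.pyRange 0 (base_len - 1) 1).foldl
    (fun b i =>
      if PySem.Int.mod i 2 == 0 then
        b ++ [PySem.List.pyGetD b (-1) 0 + 1]       -- base.append(base[-1] + 1)
      else
        (PySem.List.pyGetD b 0 0 - 1) :: b)          -- base.insert(0, base[0] - 1)
    [bp]

-- ===== PORT B =====
def baseChecker_alt (l : List Int) (bp : Int) (base : List Int) (base_len : Int) : List Int :=
  let n0 := base_len - 1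
  let n := if n0 < 0 then 0 else n0
  let lo := bp - PySem.Int.floordiv n 2
  let hi := bp + PySem.Int.floordiv (n + 1) 2
  PySem.List.pyRange lo (hi + 1) 1

-- ===== PRECONDITION & SPEC =====
def Spec_baseChecker (l : List Int) (bp : Int) (base : List Int) (base_len : Int) (out : List Int) : Prop := out = baseChecker_alt l bp base base_len
instance (l : List Int) (bp : Int) (base : List Int) (base_len : Int) (out : List Int) : Decidable (Spec_baseChecker l bp base base_len out) := by unfold Spec_baseChecker; infer_instance

-- ===== CLAIM (what is proved, stated in full; the proofs are below) =====
def Claim_equal_baseChecker : Prop := ∀ (l : List Int) (bp : Int) (base : List Int) (base_len : Int), Dom_baseChecker l bp base base_len → Spec_baseChecker l bp base base_len (baseChecker l bp base base_len)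

-- ===== LEMMAS AND PROOFS =====

-- the loop invariant: after k iterations the accumulator is the contiguous range
-- [bp - k/2, bp + (k+1)/2]  (Nat division)
theorem baseChecker_loop_eq (bp : Int) (k : Nat) :
    (PySem.List.pyRange 0 (k : Int) 1).foldl
      (fun b i =>
        if PySem.Int.mod i 2 == 0 then
          b ++ [PySem.List.pyGetD b (-1) 0 + 1]
        else
          (PySem.List.pyGetD b 0 0 - 1) :: b)
      [bp]
    = PySem.List.pyRange (bp - ((k / 2 : Nat) : Int)) (bp + (((k + 1) / 2 : Nat) : Int) + 1) 1 := by
  induction k with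
  | zero =>
      simp [PySem.List.pyRange_one_eq_nil, PySem.List.pyRange_one_singleton]
  | succ k ih =>
      have hsplit : PySem.List.pyRange 0 ((k + 1 : Nat) : Int) 1
          = PySem.List.pyRange 0 (k : Int) 1 ++ [(k : Int)] := by
        have h1 : ((k + 1 : Nat) : Int) = (k : Int) + 1 := by push_cast; ring
        rw [h1, PySem.List.pyRange_one_succ_right (by positivity)]
      rw [hsplit, List.foldl_append, ih]
      set lo : Int := bp - ((k / 2 : Nat) : Int) with hlo
      set hi : Int := bp + (((k + 1) / 2 : Nat) : Int) + 1 with hhi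
      have hlohi : lo < hi := by
        have h1 : (0 : Int) ≤ ((k / 2 : Nat) : Int) := by positivity
        have h2 : (0 : Int) ≤ (((k + 1) / 2 : Nat) : Int) := by positivity
        omega
      simp only [List.foldl_cons, List.foldl_nil]
      rcases Nat.even_or_odd k with he | ho
      · -- even k: append at the back
        have he2 : k % 2 = 0 := Nat.even_iff.mp he
        have hmod : PySem.Int.mod (k : Int) 2 = 0 := by
          rw [show ((2 : Int) = ((2 : Nat) : Int)) from rfl, PySem.Int.mod_natCast]
          omega
        rw [hmod]
        have hdecomp : PySem.List.pyRange lo hi 1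
            = PySem.List.pyRange lo (hi - 1) 1 ++ [hi - 1] := by
          have h := PySem.List.pyRange_one_succ_right (a := lo) (b := hi - 1) (by omega)
          rw [sub_add_cancel] at h
          exact h
        simp only [BEq.rfl, if_pos]
        rw [hdecomp, PySem.List.pyGetD_neg_one_append_singleton, ← hdecomp]
        have hend : hi - 1 + 1 = hi := by ring
        rw [hend, ← PySem.List.pyRange_one_succ_right (le_of_lt hlohi)]
        have hA : lo = bp - (((k + 1) / 2 : Nat) : Int) := by
          rw [hlo]; congr 2; omega
        have hB : hi + 1 = bp + (((k + 1 + 1) / 2 : Nat) : Int) + 1 := by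
          rw [hhi]
          have h3 : (k + 1 + 1) / 2 = (k + 1) / 2 + 1 := by omega
          rw [h3]; push_cast; ring
        rw [hA, hB]
      · -- odd k: insert at the front
        have ho2 : k % 2 = 1 := Nat.odd_iff.mp ho
        have hmod : PySem.Int.mod (k : Int) 2 = 1 := by
          rw [show ((2 : Int) = ((2 : Nat) : Int)) from rfl, PySem.Int.mod_natCast]
          omega
        rw [hmod]
        simp only [show ((1 : Int) == 0) = false from rfl, Bool.false_eq_true, if_false]
        have hhead : PySem.List.pyGetD (PySem.List.pyRange lo hi 1) 0 0 = lo := by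
          rw [PySem.List.pyRange_one_cons hlohi, PySem.List.pyGetD_zero_cons]
        rw [hhead]
        have hcons : (lo - 1) :: PySem.List.pyRange lo hi 1
            = PySem.List.pyRange (lo - 1) hi 1 := by
          have h := PySem.List.pyRange_one_cons (a := lo - 1) (b := hi) (by omega)
          rw [sub_add_cancel] at h
          exact h.symm
        rw [hcons]
        have hA : lo - 1 = bp - (((k + 1) / 2 : Nat) : Int) := by
          rw [hlo]
          have h3 : (k + 1) / 2 = k / 2 + 1 := by omega
          rw [h3]; push_cast; ring
        have hB : hi = bp + (((k + 1 + 1) / 2 : Nat) : Int) + 1 := by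
          rw [hhi]
          have h3 : (k + 1 + 1) / 2 = (k + 1) / 2 := by omega
          rw [h3]
        rw [hA, hB]

-- ===== VERDICT (by name: the statement is the Claim_ definition above) =====
theorem baseChecker_spec : Claim_equal_baseChecker := by
  intro l bp base base_len _
  unfold Spec_baseChecker baseChecker baseChecker_alt
  by_cases h : base_len - 1 < 0
  · -- empty loop: both sides are [bp]
    rw [PySem.List.pyRange_one_eq_nil (by omega)]
    simp only [List.foldl_nil, if_pos h]
    have h0 : PySem.Int.floordiv 0 2 = 0 := by decide
    have h1 : PySem.Int.floordiv (0 + 1) 2 = 0 := by decide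
    rw [h0, h1, sub_zero, add_zero, PySem.List.pyRange_one_singleton]
  · push_neg at h
    obtain ⟨k, hk⟩ : ∃ k : Nat, base_len - 1 = (k : Int) :=
      ⟨(base_len - 1).toNat, by omega⟩
    rw [hk, baseChecker_loop_eq]
    simp only [if_neg (by omega : ¬ ((k : Int) < 0))]
    have hA : PySem.Int.floordiv (k : Int) 2 = ((k / 2 : Nat) : Int) := by
      rw [show ((2 : Int) = ((2 : Nat) : Int)) from rfl, PySem.Int.floordiv_natCast]
    have hB : PySem.Int.floordiv ((k : Int) + 1) 2 = (((k + 1) / 2 : Nat) : Int) := by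
      rw [show ((k : Int) + 1 = ((k + 1 : Nat) : Int)) by push_cast; ring,
        show ((2 : Int) = ((2 : Nat) : Int)) from rfl, PySem.Int.floordiv_natCast]
    simp only [hA, hB]
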